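-- pv_equiv track=rewrite | github.com/fl4te/monolith | monolith.py | parse_rcon_colored
-- ===== SOURCE A (Python) =====
-- JK2_COLORS: dict[str, str] = {
--     "0": "#383838", "1": "#ff4444", "2": "#44ff44", "3": "#ffff44",
--     "4": "#4488ff", "5": "#44ffff", "6": "#ff44ff", "7": "#ffffff",
--     "8": "#383838",
-- }
--
-- RCON_DEFAULT_COLOR = "#ffffff"
--
-- def parse_rcon_colored(raw: str) -> list[tuple[str, str]]:
--     if raw.startswith("\xff\xff\xff\xff"):
--         raw = raw[4:]
--     if raw.startswith("print\n"):
--         raw = raw[6:]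
--     lines = [ln.rstrip() for ln in raw.split("\n") if ln.strip()]
--     joined = "\n".join(lines)
--     if not joined:
--         return []
--     segments: list[tuple[str, str]] = []
--     color = RCON_DEFAULT_COLOR
--     buf = ""
--     i = 0
--     while i < len(joined):
--         ch = joined[i]
--         if ch == "^" and i + 1 < len(joined) and joined[i + 1] in JK2_COLORS:
--             if buf:
--                 segments.append((buf, color))
--                 buf = ""
--             color = JK2_COLORS[joined[i + 1]]
--             i += 2
--         else:
--             buf += ch
--             i += 1
--     if buf:
--         segments.append((buf, color))
--     return segments
-- ===== SOURCE B (Python) =====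
-- JK2_COLORS: dict[str, str] = {
--     "0": "#383838", "1": "#ff4444", "2": "#44ff44", "3": "#ffff44",
--     "4": "#4488ff", "5": "#44ffff", "6": "#ff44ff", "7": "#ffffff",
--     "8": "#383838",
-- }
--
-- RCON_DEFAULT_COLOR = "#ffffff"
--
-- def parse_rcon_colored(raw: str) -> list[tuple[str, str]]:
--     if raw.startswith("\xff\xff\xff\xff"):
--         raw = raw[4:]
--     if raw.startswith("print\n"):
--         raw = raw[6:]
--     lines = [ln.rstrip() for ln in raw.split("\n") if ln.strip()]
--     joined = "\n".join(lines)
--     if not joined: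
--         return []
--     # Tokenise on '^' once, then walk the chunks: a chunk starting with a
--     # color digit switches the color; otherwise the '^' was literal text.
--     chunks = joined.split("^")
--     segments: list[tuple[str, str]] = []
--     color = RCON_DEFAULT_COLOR
--     buf = chunks[0]
--     for chunk in chunks[1:]:
--         if chunk and chunk[0] in JK2_COLORS:
--             if buf:
--                 segments.append((buf, color))
--             color = JK2_COLORS[chunk[0]]
--             buf = chunk[1:]
--         else:
--             buf += "^" + chunk
--     if buf:
--         segments.append((buf, color))
--     return segments
-- ===== Notes on version B (the rewrite author's own statement) =====
-- stated objective: faster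
-- what changed: Replaced the index-based char-by-char while-loop scanner (with quadratic string concatenation into buf) with a single split on the caret separator followed by a flat walk over the chunks, a chunk starting with a color digit switching the color; preprocessing is kept.
import Mathlib
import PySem

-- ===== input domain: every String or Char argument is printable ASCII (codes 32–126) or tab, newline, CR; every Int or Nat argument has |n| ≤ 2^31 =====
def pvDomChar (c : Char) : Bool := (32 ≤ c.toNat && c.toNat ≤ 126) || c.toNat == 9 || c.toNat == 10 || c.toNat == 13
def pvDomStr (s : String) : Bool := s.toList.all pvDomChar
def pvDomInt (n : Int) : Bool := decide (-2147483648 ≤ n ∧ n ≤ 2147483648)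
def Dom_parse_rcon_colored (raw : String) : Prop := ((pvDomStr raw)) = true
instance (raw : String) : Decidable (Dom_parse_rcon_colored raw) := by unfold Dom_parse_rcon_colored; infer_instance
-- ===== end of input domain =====

-- B replaces A's char-by-char while-loop scanner with one split on '^' plus a flat walk
-- over the chunks (objective: faster — one split avoids the quadratic per-char buffer concatenation).

-- shared module constants (same module-level values both Pythons use)
def JK2_COLORS : PySem.Dict String String :=
  PySem.Dict.ofList [("0", "#383838"), ("1", "#ff4444"), ("2", "#44ff44"), ("3", "#ffff44"),
   ("4", "#4488ff"), ("5", "#44ffff"), ("6", "#ff44ff"), ("7", "#ffffff"),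
   ("8", "#383838")]

def RCON_DEFAULT_COLOR : String := "#ffffff"

-- `c in JK2_COLORS` on the single-char string of c
def isColorKey (c : Char) : Bool := (PySem.Dict.get? JK2_COLORS (String.ofList [c])).isSome

-- `JK2_COLORS[c]`; the `getD` default is never reached (guarded by isColorKey)
def colorOf (c : Char) : String := (PySem.Dict.get? JK2_COLORS (String.ofList [c])).getD ""

-- the identical preprocessing lines both Pythons begin with (strip prefixes,
-- split lines, rstrip, drop whitespace-only lines, rejoin)
def pvClean (raw : String) : List Char :=
  let cs0 := raw.toList
  let cs1 := if PySem.Chars.startswith cs0 [Char.ofNat 255, Char.ofNat 255, Char.ofNat 255, Char.ofNat 255]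
             then PySem.Chars.slice cs0 (some 4) none else cs0
  let cs2 := if PySem.Chars.startswith cs1 ['p','r','i','n','t','\n']
             then PySem.Chars.slice cs1 (some 6) none else cs1
  let lines := ((PySem.Chars.splitOn cs2 ['\n']).filter
                  (fun ln => PySem.Chars.strip ln ≠ [])).map PySem.Chars.rstrip
  PySem.Chars.join ['\n'] lines

-- ===== PORT A =====
-- A's while loop over `joined` with index i: structural recursion on the remaining
-- characters, same state (color, buf, segments); `if buf:` flush inlined at each site.
def scanA : List Char → String → List Char → List (String × String) → List (String × String)
  | [], color, buf, segs =>
      if buf ≠ [] then segs ++ [(String.ofList buf, color)] else segs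
  | [c], color, buf, segs =>
      -- i + 1 < len fails: the `else` branch, then the loop ends and buf flushes
      let buf := buf ++ [c]
      if buf ≠ [] then segs ++ [(String.ofList buf, color)] else segs
  | c1 :: c2 :: rest, color, buf, segs =>
      if c1 = '^' ∧ isColorKey c2 then
        scanA rest (colorOf c2) []
          (if buf ≠ [] then segs ++ [(String.ofList buf, color)] else segs)
      else
        scanA (c2 :: rest) color (buf ++ [c1]) segs
termination_by cs => cs.length

def parse_rcon_colored (raw : String) : List (String × String) :=
  let joined := pvClean raw
  if joined = [] then [] else scanA joined RCON_DEFAULT_COLOR [] []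

-- ===== PORT B =====
-- hand port of `joined.split("^")`: exact for the single-char separator '^'
def splitCaret : List Char → List (List Char)
  | [] => [[]]
  | c :: cs =>
      if c = '^' then [] :: splitCaret cs
      else match splitCaret cs with
           | h :: t => (c :: h) :: t
           | [] => [[c]]   -- unreachable: splitCaret never returns []

-- B's for-loop over chunks[1:], same state (color, buf, segments)
def walkB : List (List Char) → String → List Char → List (String × String) → List (String × String)
  | [], color, buf, segs =>
      if buf ≠ [] then segs ++ [(String.ofList buf, color)] else segs
  | chunk :: rest, color, buf, segs =>
      match chunk with
      | c :: ctail =>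
          if isColorKey c then
            walkB rest (colorOf c) ctail
              (if buf ≠ [] then segs ++ [(String.ofList buf, color)] else segs)
          else
            walkB rest color (buf ++ '^' :: chunk) segs
      | [] => walkB rest color (buf ++ ['^']) segs

def parse_rcon_colored_alt (raw : String) : List (String × String) :=
  let joined := pvClean raw
  if joined = [] then [] else
    match splitCaret joined with
    | first :: rest => walkB rest RCON_DEFAULT_COLOR first []
    | [] => []   -- unreachable: splitCaret never returns []

-- ===== PRECONDITION & SPEC =====
def Spec_parse_rcon_colored (raw : String) (out : List (String × String)) : Prop := out = parse_rcon_colored_alt raw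
instance (raw : String) (out : List (String × String)) : Decidable (Spec_parse_rcon_colored raw out) := by unfold Spec_parse_rcon_colored; infer_instance

-- ===== CLAIM (what is proved, stated in full; the proofs are below) =====
def Claim_equal_parse_rcon_colored : Prop := ∀ (raw : String), Dom_parse_rcon_colored raw → Spec_parse_rcon_colored raw (parse_rcon_colored raw)

-- ===== LEMMAS AND PROOFS =====
theorem splitCaret_ne_nil (cs : List Char) : splitCaret cs ≠ [] := by
  cases cs with
  | nil => simp [splitCaret]
  | cons c cs =>
      simp only [splitCaret]
      split
      · simp
      · split <;> simp

theorem splitCaret_caret (cs : List Char) :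
    splitCaret ('^' :: cs) = [] :: splitCaret cs := by
  simp [splitCaret]

theorem splitCaret_cons {c : Char} (hc : c ≠ '^') {cs : List Char}
    {h : List Char} {t : List (List Char)} (hht : splitCaret cs = h :: t) :
    splitCaret (c :: cs) = (c :: h) :: t := by
  rw [splitCaret.eq_def]
  simp only [if_neg hc]
  rw [hht]

theorem splitCaret_exists (cs : List Char) :
    ∃ h t, splitCaret cs = h :: t := by
  cases hsp : splitCaret cs with
  | nil => exact absurd hsp (splitCaret_ne_nil cs)
  | cons h t => exact ⟨h, t, rfl⟩

-- the walk over the chunks of cs, with buf prepended to the first chunk,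
-- computes exactly what the scanner computes
theorem scan_eq_walk (n : Nat) : ∀ (cs : List Char), cs.length ≤ n →
    ∀ (color : String) (buf : List Char) (segs : List (String × String)),
    scanA cs color buf segs =
      match splitCaret cs with
      | h :: t => walkB t color (buf ++ h) segs
      | [] => segs := by
  induction n with
  | zero =>
      intro cs hlen color buf segs
      have : cs = [] := List.eq_nil_of_length_eq_zero (Nat.le_zero.mp hlen)
      subst this
      simp [scanA, splitCaret, walkB]
  | succ n ih =>
      intro cs hlen color buf segs
      match cs with
      | [] => simp [scanA, splitCaret, walkB]
      | [c] =>
          by_cases hc : c = '^'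
          · subst hc
            simp [scanA, splitCaret, walkB]
          · rw [scanA, splitCaret_cons hc (show splitCaret [] = [] :: [] from rfl)]
            simp [walkB]
      | c1 :: c2 :: rest =>
          have hr : rest.length ≤ n := by simp at hlen; omega
          have hr2 : (c2 :: rest).length ≤ n := by simp at hlen ⊢; omega
          by_cases hcode : c1 = '^' ∧ isColorKey c2
          · obtain ⟨hc1, h2⟩ := hcode
            subst hc1
            have hc2 : c2 ≠ '^' := by
              intro h; rw [h] at h2
              revert h2; decide
            rw [scanA, if_pos (⟨rfl, h2⟩ : ('^' : Char) = '^' ∧ isColorKey c2 = true)]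
            rw [ih rest hr]
            obtain ⟨h, t, hht⟩ := splitCaret_exists rest
            rw [splitCaret_caret, splitCaret_cons hc2 hht, hht]
            simp [walkB, if_pos h2]
          · rw [scanA, if_neg hcode, ih (c2 :: rest) hr2]
            by_cases hc1 : c1 = '^'
            · -- literal '^': c2 is not a color key, merge '^' into buf
              subst hc1
              have h2 : ¬ isColorKey c2 := fun h => hcode ⟨rfl, h⟩
              rw [splitCaret_caret]
              by_cases hc2 : c2 = '^'
              · subst hc2
                rw [splitCaret_caret]
                obtain ⟨h, t, hht⟩ := splitCaret_exists rest
                simp [walkB]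
              · obtain ⟨h, t, hht⟩ := splitCaret_exists rest
                rw [splitCaret_cons hc2 hht]
                simp [walkB, if_neg h2]
            · obtain ⟨h, t, hht⟩ := splitCaret_exists (c2 :: rest)
              rw [splitCaret_cons hc1 hht, hht]
              simp

-- ===== VERDICT (by name: the statement is the Claim_ definition above) =====
theorem parse_rcon_colored_spec : Claim_equal_parse_rcon_colored := by
  intro raw _
  unfold Spec_parse_rcon_colored parse_rcon_colored parse_rcon_colored_alt
  set joined := pvClean raw with hj
  by_cases hemp : joined = []
  · simp [hemp]
  · simp only [if_neg hemp]
    rw [scan_eq_walk joined.length joined (le_refl _)]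
    cases hsp : splitCaret joined with
    | nil => exact absurd hsp (splitCaret_ne_nil _)
    | cons h t => simp
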